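-- pv_equiv track=rewrite | github.com/billyBillLiu/ticket-orchestration-chat | api2/tests/simple_field_test.py | process_choice
-- ===== SOURCE A (Python) =====
-- from typing import Any, List
--
-- def process_choice(user_input: str, options: List[str]) -> str:
--     """Process choice input - find best match from options"""
--     if not options:
--         return user_input  # No options available, return as is
--
--     user_input_lower = user_input.lower().strip()
--
--     # Exact match (case insensitive)
--     for option in options:
--         if option.lower() == user_input_lower:
--             return option
--
--     # Partial match
--     for option in options:
--         if user_input_lower in option.lower() or option.lower() in user_input_lower:
--             return option
--
--     # If no match found, raise error with available options
--     options_str = ", ".join(options)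
--     raise ValueError(f"Invalid choice: '{user_input}'. Available options: {options_str}")
-- ===== SOURCE B (Python) =====
-- from typing import List
--
-- def process_choice(user_input: str, options: List[str]) -> str:
--     """Rank every option (0 exact, 1 partial, 2 none) and select the first
--     minimum-rank option with one strict-min fold, stopping early at rank 0."""
--     if not options:
--         return user_input
--
--     ul = user_input.lower().strip()
--
--     def rank(option: str) -> int:
--         ol = option.lower()
--         if ol == ul:
--             return 0
--         if ul in ol or ol in ul:
--             return 1
--         return 2
--
--     best_rank, best = 3, None
--     for option in options:
--         r = rank(option)
--         if r < best_rank: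
--             best_rank, best = r, option
--         if best_rank == 0:
--             break
--
--     if best_rank < 2:
--         return best
--
--     options_str = ", ".join(options)
--     raise ValueError(f"Invalid choice: '{user_input}'. Available options: {options_str}")
-- ===== Notes on version B (the rewrite author's own statement) =====
-- stated objective: alternative
-- what changed: Replaces A's two sequential early-return scans with a rank-and-select algorithm: each option gets a rank (0 exact, 1 partial, 2 neither) and one strict-min fold keeps the first minimum-rank option, stopping once rank 0 is reached.
import Mathlib
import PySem

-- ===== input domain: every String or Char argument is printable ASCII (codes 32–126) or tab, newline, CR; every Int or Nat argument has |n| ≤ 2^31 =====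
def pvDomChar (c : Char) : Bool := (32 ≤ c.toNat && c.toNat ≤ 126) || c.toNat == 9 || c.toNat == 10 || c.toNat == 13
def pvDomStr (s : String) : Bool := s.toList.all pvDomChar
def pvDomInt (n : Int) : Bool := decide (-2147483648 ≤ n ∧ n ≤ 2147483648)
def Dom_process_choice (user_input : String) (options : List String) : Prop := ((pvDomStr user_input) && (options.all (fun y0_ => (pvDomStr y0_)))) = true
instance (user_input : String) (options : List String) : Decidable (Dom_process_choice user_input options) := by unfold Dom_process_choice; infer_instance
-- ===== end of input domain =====

-- B replaces A's two early-return scans by a rank-and-select: each option gets a rank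
-- (0 exact, 1 partial, 2 neither) and one strict-min fold keeps the first minimum-rank
-- option (stopping at rank 0); same value on Pre_ (where A returns instead of raising).

-- ===== PORT A =====
-- first option whose lowercase equals the lowered/stripped user input
def pcExact (ul : String) : List String → Option String
  | [] => none
  | o :: rest => if PySem.Str.lower o = ul then some o else pcExact ul rest

-- first option related to the user input by substring containment either way
def pcPartial (ul : String) : List String → Option String
  | [] => none
  | o :: rest =>
      if PySem.Str.isIn ul (PySem.Str.lower o) || PySem.Str.isIn (PySem.Str.lower o) ul then
        some o
      else pcPartial ul rest

def process_choice (user_input : String) (options : List String) : String :=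
  if options = [] then user_input
  else
    let ul := PySem.Str.strip (PySem.Str.lower user_input)
    match pcExact ul options with
    | some o => o
    | none =>
      match pcPartial ul options with
      | some o => o
      | none => ""   -- Python raises ValueError here; Pre_ excludes these inputs

-- ===== PORT B =====
-- rank of one option: 0 exact match, 1 partial match, 2 no match
def pcRank (ul o : String) : Nat :=
  let ol := PySem.Str.lower o
  if ol = ul then 0
  else if PySem.Str.isIn ul ol || PySem.Str.isIn ol ul then 1
  else 2

-- one forward strict-min fold over the ranked options ('for option in options'),
-- keeping the first option of minimal rank and breaking once rank 0 is reached
def pcBest (ul : String) (best : Nat × Option String) : List String → Nat × Option String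
  | [] => best
  | o :: rest =>
      let r := pcRank ul o
      let b := if r < best.1 then (r, some o) else best
      if b.1 = 0 then b else pcBest ul b rest

def process_choice_alt (user_input : String) (options : List String) : String :=
  if options = [] then user_input
  else
    let ul := PySem.Str.strip (PySem.Str.lower user_input)
    let b := pcBest ul (3, none) options
    if b.1 < 2 then b.2.getD ""
    else ""   -- Python raises ValueError here; Pre_ excludes these inputs

-- ===== PRECONDITION & SPEC =====
-- Pre_ excludes exactly the inputs where A (and B) raise ValueError: a nonempty option
-- list with neither an exact nor a substring match.
def Pre_process_choice (user_input : String) (options : List String) : Prop :=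
  options = [] ∨
    (∃ o ∈ options,
      let ul := PySem.Str.strip (PySem.Str.lower user_input)
      PySem.Str.lower o = ul ∨
      PySem.Str.isIn ul (PySem.Str.lower o) = true ∨
      PySem.Str.isIn (PySem.Str.lower o) ul = true)
instance (user_input : String) (options : List String) : Decidable (Pre_process_choice user_input options) := by unfold Pre_process_choice; infer_instance

def pvWitness_process_choice : String × List String := ("Red ", ["red", "blue"])

def Spec_process_choice (user_input : String) (options : List String) (out : String) : Prop := out = process_choice_alt user_input options
instance (user_input : String) (options : List String) (out : String) : Decidable (Spec_process_choice user_input options out) := by unfold Spec_process_choice; infer_instance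

-- ===== CLAIM (what is proved, stated in full; the proofs are below) =====
def Claim_equal_process_choice : Prop := ∀ (user_input : String) (options : List String), Dom_process_choice user_input options → Pre_process_choice user_input options → Spec_process_choice user_input options (process_choice user_input options)

-- ===== LEMMAS AND PROOFS =====

-- B's strict-min fold characterised by A's two scans, generalized over the
-- accumulator states the fold reaches (best rank 1, 2 or the initial 3).
theorem pcBest_eq (ul : String) (opts : List String) : ∀ b : Nat × Option String, b.1 ≠ 0 →
    pcBest ul b opts =
      match pcExact ul opts with
      | some e => (0, some e)
      | none =>
        if b.1 = 1 then b
        else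
          match pcPartial ul opts with
          | some p => (1, some p)
          | none =>
            if b.1 = 2 then b
            else match opts with
              | [] => b
              | o :: _ => (2, some o) := by
  induction opts with
  | nil =>
    intro b hb
    rcases b with ⟨b1, bo⟩
    simp only [pcBest, pcExact, pcPartial]
    split_ifs <;> rfl
  | cons o rest ih =>
    intro b hb
    rcases b with ⟨b1, bo⟩
    simp only [pcBest, pcExact, pcPartial]
    by_cases he : PySem.Str.lower o = ul
    · have hr : pcRank ul o = 0 := by simp [pcRank, he]
      simp [hr, he, Nat.pos_of_ne_zero hb]
    · by_cases hc : (PySem.Str.isIn ul (PySem.Str.lower o) ||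
          PySem.Str.isIn (PySem.Str.lower o) ul) = true
      · -- rank 1
        simp only [PySem.Str.isIn, PySem.Str.toList_lower, Bool.or_eq_true] at hc
        have hr : pcRank ul o = 1 := by simp [pcRank, he, hc]
        simp only [hr]
        by_cases h1 : b1 = 1
        · rw [if_neg (by omega : ¬ (1 < b1))]
          simp only [if_neg hb]
          rw [ih ⟨b1, bo⟩ hb]
          cases hex : pcExact ul rest <;> simp [he, h1]
        · rw [if_pos (by omega : 1 < b1)]
          simp only [if_neg (by omega : ¬ (1 : Nat) = 0)]
          rw [ih ⟨1, some o⟩ (by simp)]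
          cases hex : pcExact ul rest <;> simp [he, hc, h1]
      · -- rank 2
        simp only [PySem.Str.isIn, PySem.Str.toList_lower, Bool.or_eq_true] at hc
        have hr : pcRank ul o = 2 := by simp [pcRank, he, hc]
        simp only [hr]
        by_cases h2 : 2 < b1
        · rw [if_pos h2]
          simp only [if_neg (by omega : ¬ (2 : Nat) = 0)]
          rw [ih ⟨2, some o⟩ (by simp)]
          have hb1 : ¬ b1 = 1 := by omega
          have hb2 : ¬ b1 = 2 := by omega
          cases hex : pcExact ul rest <;> cases hp : pcPartial ul rest <;>
            simp [he, hc, hb1, hb2]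
        · rw [if_neg h2]
          simp only [if_neg hb]
          rw [ih ⟨b1, bo⟩ hb]
          have hb12 : b1 = 1 ∨ b1 = 2 := by omega
          cases hex : pcExact ul rest <;> cases hp : pcPartial ul rest <;>
            rcases hb12 with h1 | h1 <;> simp [he, hc, h1]

-- if both of A's scans fail, no option matches at all
theorem pc_no_match (ul : String) (opts : List String)
    (hex : pcExact ul opts = none) (hp : pcPartial ul opts = none) :
    ∀ o ∈ opts, ¬(PySem.Str.lower o = ul ∨
      PySem.Chars.isIn ul.toList (PySem.Chars.lower o.toList) = true ∨
      PySem.Chars.isIn (PySem.Chars.lower o.toList) ul.toList = true) := by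
  induction opts with
  | nil => intro o ho; simp at ho
  | cons a rest ih =>
    intro o ho
    simp only [pcExact] at hex
    simp only [pcPartial] at hp
    by_cases he : PySem.Str.lower a = ul
    · simp [he] at hex
    · by_cases hc : PySem.Chars.isIn ul.toList (PySem.Chars.lower a.toList) = true ∨
          PySem.Chars.isIn (PySem.Chars.lower a.toList) ul.toList = true
      · simp_all
      · rcases List.mem_cons.mp ho with rfl | ho'
        · simp_all
        · exact ih (by simp_all) (by simp_all) o ho'

-- ===== VERDICT (by name: the statement is the Claim_ definition above) =====
theorem process_choice_spec : Claim_equal_process_choice := by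
  intro user_input options _ hpre
  unfold Spec_process_choice process_choice process_choice_alt
  by_cases h : options = []
  · simp [h]
  · simp only [h, if_false,
      pcBest_eq (PySem.Str.strip (PySem.Str.lower user_input)) options (3, none) (by simp)]
    rcases hpre with hpre | ⟨o, ho, hrel⟩
    · exact absurd hpre h
    · cases hex : pcExact (PySem.Str.strip (PySem.Str.lower user_input)) options with
      | some e => simp
      | none =>
        cases hp : pcPartial (PySem.Str.strip (PySem.Str.lower user_input)) options with
        | some p => simp
        | none =>
          exfalso
          have := pc_no_match _ _ hex hp o ho
          simp only at hrel
          simp only [PySem.Str.isIn, PySem.Str.toList_lower, PySem.Str.toList_strip]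
            at this hrel
          exact this hrel
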